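-- pv_equiv track=rewrite | github.com/ivanillera/TP1Sintaxis | Lexer.py | a_eof
-- ===== SOURCE A (Python) =====
-- TRAMPA = -1
--
-- RESULTADO_ACEPTADO = "ACEPTADO"
--
-- RESULTADO_TRAMPA = "TRAMPA"
--
-- RESULTADO_NO_ACEPTADO = "NO_ACEPTADO"
--
-- def d_eof(estado_anterior, caracter):
-- 	if estado_anterior == 0 and caracter == "e":
-- 		return 1
-- 	if estado_anterior == 1 and caracter == "o":
-- 		return 2
-- 	if estado_anterior == 2 and caracter == "f":
-- 		return 3
--
--
-- 	return RESULTADO_TRAMPA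
--
-- def a_eof(cadena):
-- 	Finales = [3]
-- 	estado_actual = 0
--
-- 	for caracter in cadena:
-- 		estado_proximo = d_eof(estado_actual, caracter)
-- 		if estado_proximo == TRAMPA:
-- 			return RESULTADO_TRAMPA
-- 		estado_actual = estado_proximo
--
-- 	if estado_actual in Finales:
-- 		return RESULTADO_ACEPTADO
-- 	else:
-- 		return RESULTADO_NO_ACEPTADO
-- ===== SOURCE B (Python) =====
-- RESULTADO_ACEPTADO = "ACEPTADO"
-- RESULTADO_NO_ACEPTADO = "NO_ACEPTADO"
--
-- def a_eof(cadena):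
--     # Direct comparison: accepted iff the character sequence is exactly 'e','o','f'.
--     # (A's trap branch is dead code: it compares the string "TRAMPA" to -1, so A
--     # always consumes the whole input and never returns "TRAMPA".)
--     chars = list(cadena)
--     return RESULTADO_ACEPTADO if chars == ['e', 'o', 'f'] else RESULTADO_NO_ACEPTADO
-- ===== Notes on version B (the rewrite author's own statement) =====
-- stated objective: simpler
-- what changed: Replaced the DFA transition loop (whose trap branch is dead code, comparing the string "TRAMPA" against -1) with a direct comparison of the character sequence against ['e','o','f'].
import Mathlib
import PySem

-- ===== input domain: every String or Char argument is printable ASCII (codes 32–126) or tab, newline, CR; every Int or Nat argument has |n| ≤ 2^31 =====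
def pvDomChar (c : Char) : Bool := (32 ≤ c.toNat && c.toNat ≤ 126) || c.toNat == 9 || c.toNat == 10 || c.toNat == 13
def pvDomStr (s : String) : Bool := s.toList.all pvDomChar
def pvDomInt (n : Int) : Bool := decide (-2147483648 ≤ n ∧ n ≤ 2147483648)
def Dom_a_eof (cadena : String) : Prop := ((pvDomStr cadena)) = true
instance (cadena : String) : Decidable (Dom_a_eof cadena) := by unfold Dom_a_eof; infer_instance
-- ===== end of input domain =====

-- B replaces the DFA loop (whose trap branch is dead code: it compares the string
-- "TRAMPA" with the int -1) by a direct comparison of the characters with ['e','o','f'].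

-- ===== PORT A =====
-- Python's estado is either an int or the string "TRAMPA" (d_eof's fall-through).
-- We model it as Option Int: some n = the int n, none = the string "TRAMPA".
def d_eof (estado_anterior : Option Int) (caracter : Char) : Option Int :=
  if estado_anterior = some 0 ∧ caracter = 'e' then some 1
  else if estado_anterior = some 1 ∧ caracter = 'o' then some 2
  else if estado_anterior = some 2 ∧ caracter = 'f' then some 3
  else none

-- the for-loop with early return, followed by the final-state test
def a_eof_loop (estado_actual : Option Int) : List Char → String
  | [] => if estado_actual = some 3 then "ACEPTADO" else "NO_ACEPTADO"
  | c :: rest =>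
    let estado_proximo := d_eof estado_actual c
    -- 'estado_proximo == TRAMPA' compares with the int -1; the string "TRAMPA" never equals it
    if estado_proximo = some (-1) then "TRAMPA" else a_eof_loop estado_proximo rest

def a_eof (cadena : String) : String := a_eof_loop (some 0) cadena.toList

-- ===== PORT B =====
def a_eof_alt (cadena : String) : String :=
  if cadena.toList = ['e', 'o', 'f'] then "ACEPTADO" else "NO_ACEPTADO"

-- ===== PRECONDITION & SPEC =====
def Spec_a_eof (cadena : String) (out : String) : Prop := out = a_eof_alt cadena
instance (cadena : String) (out : String) : Decidable (Spec_a_eof cadena out) := by unfold Spec_a_eof; infer_instance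

-- ===== CLAIM (what is proved, stated in full; the proofs are below) =====
def Claim_equal_a_eof : Prop := ∀ (cadena : String), Dom_a_eof cadena → Spec_a_eof cadena (a_eof cadena)

-- ===== LEMMAS AND PROOFS =====

-- once trapped (estado = "TRAMPA"), the loop still runs to the end and rejects
theorem a_eof_loop_none (l : List Char) : a_eof_loop none l = "NO_ACEPTADO" := by
  induction l with
  | nil => simp [a_eof_loop]
  | cons c rest ih => simp [a_eof_loop, d_eof, ih]

theorem a_eof_loop_zero (l : List Char) :
    a_eof_loop (some 0) l = if l = ['e', 'o', 'f'] then "ACEPTADO" else "NO_ACEPTADO" := by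
  cases l with
  | nil => simp [a_eof_loop]
  | cons c1 r1 =>
    by_cases h1 : c1 = 'e'
    · subst h1
      cases r1 with
      | nil => simp [a_eof_loop, d_eof]
      | cons c2 r2 =>
        by_cases h2 : c2 = 'o'
        · subst h2
          cases r2 with
          | nil => simp [a_eof_loop, d_eof]
          | cons c3 r3 =>
            by_cases h3 : c3 = 'f'
            · subst h3
              cases r3 with
              | nil => simp [a_eof_loop, d_eof]
              | cons c4 r4 =>
                simp [a_eof_loop, d_eof, a_eof_loop_none]
            · simp [a_eof_loop, d_eof, h3, a_eof_loop_none]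
        · simp [a_eof_loop, d_eof, h2, a_eof_loop_none]
    · simp [a_eof_loop, d_eof, h1, a_eof_loop_none]

-- ===== VERDICT (by name: the statement is the Claim_ definition above) =====
theorem a_eof_spec : Claim_equal_a_eof := by
  intro cadena _
  unfold Spec_a_eof a_eof a_eof_alt
  exact a_eof_loop_zero cadena.toList
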